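-- pv_equiv track=rewrite | github.com/ksayee/programming_assignments | python/CodingExercises/KthNonRepeatingCharacter.py | KthNonRepeatingCharacter
-- ===== SOURCE A (Python) =====
-- def KthNonRepeatingCharacter(str1,k):
--
--     dict={}
--     stk=[]
--     for i in range(0,len(str1)):
--         key=str1[i]
--
--         if key in dict.keys():
--             dict[key]=dict.get(key)+1
--         else:
--             dict[key]=1
--
--         if dict[key]==1:
--             stk.append(key)
--         else:
--             try:
--                 idx=stk.index(key)
--                 del stk[idx]
--             except:
--                 pass
--     if k-1<len(stk):
--         return stk[k-1]
--     else:
--         return "Not Existing"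
-- ===== SOURCE B (Python) =====
-- def KthNonRepeatingCharacter(str1, k):
--     result = [c for c in str1 if str1.count(c) == 1]
--     if k - 1 < len(result):
--         return result[k - 1]
--     else:
--         return "Not Existing"
-- ===== Notes on version B (the rewrite author's own statement) =====
-- stated objective: simpler
-- what changed: Replaces A's incremental dict-counter plus stack with append/index/del bookkeeping by a single filter of the string on global character frequency (str1.count(c)==1), keeping the identical k-1 selection guard.
import Mathlib
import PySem

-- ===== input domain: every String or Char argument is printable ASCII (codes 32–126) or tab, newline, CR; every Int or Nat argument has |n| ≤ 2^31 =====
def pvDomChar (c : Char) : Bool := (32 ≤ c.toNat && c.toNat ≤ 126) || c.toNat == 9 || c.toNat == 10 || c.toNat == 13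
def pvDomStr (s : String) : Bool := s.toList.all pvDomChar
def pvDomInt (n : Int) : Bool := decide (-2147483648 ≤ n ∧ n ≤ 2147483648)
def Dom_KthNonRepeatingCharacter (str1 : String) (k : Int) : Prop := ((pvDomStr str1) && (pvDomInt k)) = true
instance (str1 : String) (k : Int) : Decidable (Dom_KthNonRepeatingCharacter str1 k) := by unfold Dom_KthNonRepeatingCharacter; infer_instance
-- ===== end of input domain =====

-- B replaces A's dict-counter + stack bookkeeping with a direct filter of the
-- string on global character frequency; same k-1 selection guard (objective: simpler).


-- ===== PORT A =====
-- one loop iteration: update the counting dict, then append to / delete from the stack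
def pvStepA (acc : PySem.Dict Char Int × List Char) (key : Char) : PySem.Dict Char Int × List Char :=
  let d := acc.1
  let stk := acc.2
  let d' := if d.contains key then d.insert key (d.getD key 0 + 1) else d.insert key 1
  let stk' :=
    if d'.getD key 0 == 1 then stk ++ [key]
    else
      match PySem.List.index? stk key with   -- try: idx = stk.index(key); del stk[idx]
      | some idx => stk.eraseIdx idx          -- del stk[idx] (idx from index? is in range)
      | none => stk                           -- except: pass
  (d', stk')

def KthNonRepeatingCharacter (str1 : String) (k : Int) : String :=
  let cs := str1.toList
  -- for i in range(0, len(str1)): key = str1[i]; …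
  let res := (PySem.List.pyRange 0 (cs.length : Int) 1).foldl
    (fun acc i => pvStepA acc (PySem.List.pyGetD cs i ' ')) (PySem.Dict.empty, [])
  let stk := res.2
  if k - 1 < (stk.length : Int) then
    String.ofList [PySem.List.pyGetD stk (k - 1) ' ']   -- stk[k-1]; in range under Pre_
  else "Not Existing"

-- ===== PORT B =====
def KthNonRepeatingCharacter_alt (str1 : String) (k : Int) : String :=
  -- result = [c for c in str1 if str1.count(c) == 1]  (single-char needle: str.count = list count)
  let result := str1.toList.filter (fun c => str1.toList.count c == 1)
  if k - 1 < (result.length : Int) then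
    String.ofList [PySem.List.pyGetD result (k - 1) ' ']  -- result[k-1]; in range under Pre_
  else "Not Existing"

-- ===== PRECONDITION & SPEC =====
-- Pre_ excludes exactly the inputs where Python A raises IndexError: k-1 below minus the
-- number of characters occurring exactly once (both Pythons raise there identically).
def Pre_KthNonRepeatingCharacter (str1 : String) (k : Int) : Prop :=
  -((str1.toList.filter (fun c => str1.toList.count c == 1)).length : Int) ≤ k - 1
instance (str1 : String) (k : Int) : Decidable (Pre_KthNonRepeatingCharacter str1 k) := by
  unfold Pre_KthNonRepeatingCharacter; infer_instance
def pvWitness_KthNonRepeatingCharacter : String × Int := ("aabc", 1)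
def Spec_KthNonRepeatingCharacter (str1 : String) (k : Int) (out : String) : Prop := out = KthNonRepeatingCharacter_alt str1 k
instance (str1 : String) (k : Int) (out : String) : Decidable (Spec_KthNonRepeatingCharacter str1 k out) := by unfold Spec_KthNonRepeatingCharacter; infer_instance

-- ===== CLAIM (what is proved, stated in full; the proofs are below) =====
def Claim_equal_KthNonRepeatingCharacter : Prop := ∀ (str1 : String) (k : Int), Dom_KthNonRepeatingCharacter str1 k → Pre_KthNonRepeatingCharacter str1 k → Spec_KthNonRepeatingCharacter str1 k (KthNonRepeatingCharacter str1 k)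

-- ===== LEMMAS AND PROOFS =====

-- the dict update of pvStepA is the standard counting update in both branches
lemma pvDictUpd (d : PySem.Dict Char Int) (key : Char) :
    (if d.contains key then d.insert key (d.getD key 0 + 1) else d.insert key 1) =
      d.insert key (d.getD key 0 + 1) := by
  by_cases h : d.contains key = true
  · rw [if_pos h]
  · simp only [Bool.not_eq_true] at h
    rw [if_neg (by simp [h])]
    simp [PySem.Dict.getD_of_not_contains, h]

lemma pvEraseIdxAppend (pre suf : List Char) (x : Char) :
    (pre ++ x :: suf).eraseIdx pre.length = pre ++ suf := by
  induction pre with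
  | nil => rfl
  | cons a t ih => simp [ih]

-- the stack of A is duplicate-free: its members occur exactly once in p
lemma pvNodupStk (p : List Char) : (p.filter (fun c => p.count c == 1)).Nodup := by
  rw [List.nodup_iff_count_le_one]
  intro a
  by_cases h : (p.count a == 1) = true
  · rw [List.count_filter (p := fun c => List.count c p == 1) (a := a) h]
    simp only [beq_iff_eq] at h
    omega
  · have hm : a ∉ p.filter (fun c => p.count c == 1) := by
      intro hm; rw [List.mem_filter] at hm; exact h hm.2
    rw [List.count_eq_zero.mpr hm]
    omega

-- appending one character to the processed prefix updates the unique-character list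
-- exactly the way A's stack branch does
lemma pvFilterSnoc (p : List Char) (x : Char) (hx : x ∈ p) :
    (p ++ [x]).filter (fun c => (p ++ [x]).count c == 1) =
      (p.filter (fun c => p.count c == 1)).filter (fun c => c != x) := by
  have hcx : 0 < p.count x := List.count_pos_iff.mpr hx
  rw [List.filter_append]
  have h1 : List.filter (fun c => (p ++ [x]).count c == 1) [x] = [] := by
    simp [List.count_append]
    omega
  rw [h1, List.append_nil, List.filter_filter]
  apply List.filter_congr
  intro c hc
  by_cases hcxeq : c = x
  · subst hcxeq
    simp [List.count_append]
    omega
  · simp [List.count_append, hcxeq, Ne.symm hcxeq]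

lemma pvLoopA (p : List Char) :
    p.foldl pvStepA (PySem.Dict.empty, []) =
      (p.foldl (fun d x => d.insert x (d.getD x 0 + 1)) PySem.Dict.empty,
       p.filter (fun c => p.count c == 1)) := by
  induction p using List.reverseRecOn with
  | nil => rfl
  | append_singleton p x ih =>
    rw [List.foldl_append, List.foldl_append, ih]
    set D : PySem.Dict Char Int := p.foldl (fun d x => d.insert x (d.getD x 0 + 1)) PySem.Dict.empty with hD
    set S := p.filter (fun c => p.count c == 1) with hS
    have hcount : D.getD x 0 = (p.count x : Int) := by
      rw [hD, PySem.Dict.getD_foldl_insert_add_one]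
      simp
    simp only [pvStepA, pvDictUpd, List.foldl_cons, List.foldl_nil, Prod.mk.injEq]
    refine ⟨trivial, ?_⟩
    rw [PySem.Dict.getD_insert_self, hcount]
    by_cases hx : x ∈ p
    · -- x seen before: the == 1 test fails and the stack branch deletes x if present
      have hcx : 0 < p.count x := List.count_pos_iff.mpr hx
      rw [if_neg (by simp; omega)]
      rw [pvFilterSnoc p x hx]
      by_cases hxS : x ∈ S
      · -- x is on the stack exactly once: index finds it and del removes it
        have hsome : (PySem.List.index? S x).isSome := (PySem.List.index?_isSome_iff _ _).mpr hxS
        obtain ⟨k, hk⟩ := Option.isSome_iff_exists.mp hsome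
        obtain ⟨pre, suf, hdec, hlen, hxpre⟩ := (PySem.List.index?_eq_some_iff _ _ _).mp hk
        rw [hk]
        have hnd : S.Nodup := pvNodupStk p
        have hfe : S.filter (fun c => c != x) = S.eraseIdx k := by
          rw [← hnd.erase_eq_filter x, hdec, ← hlen,
            List.erase_append_right _ (by simpa using hxpre), List.erase_cons_head,
            pvEraseIdxAppend]
        rw [hfe]
      · -- x is repeated and already off the stack: index raises, except: pass
        rw [(PySem.List.index?_eq_none_iff _ _).mpr hxS]
        rw [List.filter_eq_self.mpr]
        intro a ha
        simp only [bne_iff_ne, ne_eq]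
        intro heq
        exact hxS (heq ▸ ha)
    · -- first (and only) occurrence: count becomes 1, x is pushed
      have hcx : p.count x = 0 := List.count_eq_zero.mpr hx
      rw [if_pos (by simp [hcx])]
      rw [List.filter_append]
      have h1 : List.filter (fun c => (p ++ [x]).count c == 1) [x] = [x] := by
        simp [List.count_append, List.count_singleton, hcx]
      rw [h1]
      congr 1
      apply List.filter_congr
      intro c hc
      have hcne : ¬(x == c) = true := by
        simp only [beq_iff_eq]
        intro heq; exact hx (heq ▸ hc)
      simp [List.count_append, List.count_singleton, hcne]


theorem KthNonRepeatingCharacter_eq (str1 : String) (k : Int) :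
    KthNonRepeatingCharacter str1 k = KthNonRepeatingCharacter_alt str1 k := by
  simp only [KthNonRepeatingCharacter, KthNonRepeatingCharacter_alt]
  rw [PySem.List.foldl_pyRange_zero_pyGetD' str1.toList ' ' pvStepA (PySem.Dict.empty, []),
    pvLoopA]

-- ===== VERDICT (by name: the statement is the Claim_ definition above) =====
theorem KthNonRepeatingCharacter_spec : Claim_equal_KthNonRepeatingCharacter := by
  intro str1 k _ _
  exact KthNonRepeatingCharacter_eq str1 k
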